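-- pv_equiv track=rewrite | github.com/BuddiesOfBudgie/budgie-desktop | src/bridges/labwc/labwc_bridge.py | normalize_xkb_options
-- ===== SOURCE A (Python) =====
-- def normalize_xkb_options(options_set):
--     """
--     Normalize XKB options to avoid conflicts.
--     Only certain option families are mutually exclusive
--     Other families like lv3:, compose: can have multiple options.
--
--     Known mutually-exclusive families: grp, caps, ctrl, altwin
--
--     Args:
--         options_set: Set of XKB option strings
--
--     Returns:
--         Set of normalized options
--     """
--     if not options_set:
--         return set()
--
--     # Families where only one option should be kept
--     exclusive_families = {'grp', 'caps', 'ctrl', 'altwin'}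
--
--     seen_exclusive = {}
--     normalized = set()
--
--     for option in sorted(options_set):  # Sort for consistent behavior
--         if ':' in option:
--             family = option.split(':', 1)[0]
--
--             if family in exclusive_families:
--                 # Keep only first of exclusive families
--                 if family not in seen_exclusive:
--                     seen_exclusive[family] = option
--                     normalized.add(option)
--                 # else: skip duplicate exclusive family
--             else:
--                 # Non-exclusive family - keep all
--                 normalized.add(option)
--         else:
--             # Options without family (rare) - keep all
--             normalized.add(option)
--
--     return normalized
-- ===== SOURCE B (Python) =====
-- _EXCLUSIVE_FAMILIES = {'grp', 'caps', 'ctrl', 'altwin'}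
--
--
-- def normalize_xkb_options(options_set):
--     """Two-phase rewrite: first find the lexicographic minimum of every exclusive
--     family in one unsorted pass, then keep exactly the options that survive,
--     in sorted order for consistent behavior."""
--     if not options_set:
--         return set()
--
--     best = {}
--     for option in options_set:
--         if ':' in option:
--             family = option.split(':', 1)[0]
--             if family in _EXCLUSIVE_FAMILIES:
--                 if family not in best or option < best[family]:
--                     best[family] = option
--
--     return {option for option in sorted(options_set)
--             if ':' not in option
--             or option.split(':', 1)[0] not in _EXCLUSIVE_FAMILIES
--             or best[option.split(':', 1)[0]] == option}
-- ===== Notes on version B (the rewrite author's own statement) =====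
-- stated objective: alternative
-- what changed: A does one stateful first-wins scan over the sorted input with a seen_exclusive dict; B is two-phase: an unsorted pass computing the lexicographic minimum per exclusive family, then a stateless filter comprehension over the sorted input keeping exactly the surviving options.
import Mathlib
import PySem

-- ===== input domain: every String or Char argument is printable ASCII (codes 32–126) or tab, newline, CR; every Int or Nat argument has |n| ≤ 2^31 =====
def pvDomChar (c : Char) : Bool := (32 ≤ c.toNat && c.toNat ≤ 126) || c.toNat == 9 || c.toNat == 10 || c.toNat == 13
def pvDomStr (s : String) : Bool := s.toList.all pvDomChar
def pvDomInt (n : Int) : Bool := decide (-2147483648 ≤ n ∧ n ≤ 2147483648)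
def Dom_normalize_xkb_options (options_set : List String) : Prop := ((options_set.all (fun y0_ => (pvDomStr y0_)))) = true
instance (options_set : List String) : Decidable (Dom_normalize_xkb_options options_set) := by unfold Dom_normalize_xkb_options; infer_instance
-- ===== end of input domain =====

-- B replaces A's single stateful first-wins scan over the sorted input with a
-- two-phase group-by: one unsorted pass computing the minimum per exclusive
-- family, then a stateless filter (objective: alternative decomposition).


-- ===== PORT A =====
-- the set literal {'grp', 'caps', 'ctrl', 'altwin'}; used for membership only
def pvExclusiveFamilies : PySem.Set String := PySem.Set.ofList ["grp", "caps", "ctrl", "altwin"]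

-- option.split(':', 1)[0] (both sources compute the family by this same expression)
def pvFamilyOf (option : String) : String :=
  ((PySem.Str.splitMax? option ":" 1).getD []).getD 0 ""

-- one iteration of A's for-loop (state: seen_exclusive, normalized)
def pvAStep (st : PySem.Dict String String × PySem.Set String) (option : String) :
    PySem.Dict String String × PySem.Set String :=
  if PySem.Str.isIn ":" option then
    let family := pvFamilyOf option
    if pvExclusiveFamilies.contains family then
      if st.1.contains family = false then
        (st.1.insert family option, st.2.add option)
      else
        (st.1, st.2)
    else
      (st.1, st.2.add option)
  else
    (st.1, st.2.add option)

def normalize_xkb_options (options_set : List String) : List String :=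
  if options_set.isEmpty then
    []
  else
    ((PySem.List.sorted options_set (fun x => x) false).foldl pvAStep
      (PySem.Dict.empty, PySem.Set.empty)).2

-- ===== PORT B =====
-- pass 1 body: record the lexicographically least option of each exclusive family
def pvBestStep (best : PySem.Dict String String) (option : String) :
    PySem.Dict String String :=
  if PySem.Str.isIn ":" option then
    let family := pvFamilyOf option
    if pvExclusiveFamilies.contains family then
      if best.contains family = false then best.insert family option
      else if option < best.getD family "" then best.insert family option
      else best
    else best
  else best

-- pass 2 body: the comprehension's condition
def pvKeep (best : PySem.Dict String String) (option : String) : Bool :=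
  !(PySem.Str.isIn ":" option)
  || !(pvExclusiveFamilies.contains (pvFamilyOf option))
  || (best.getD (pvFamilyOf option) "" == option)

def normalize_xkb_options_alt (options_set : List String) : List String :=
  if options_set.isEmpty then
    []
  else
    let best := options_set.foldl pvBestStep PySem.Dict.empty
    PySem.Set.ofList
      ((PySem.List.sorted options_set (fun x => x) false).filter (pvKeep best))

-- ===== PRECONDITION & SPEC =====
def Spec_normalize_xkb_options (options_set : List String) (out : List String) : Prop := out = normalize_xkb_options_alt options_set
instance (options_set : List String) (out : List String) : Decidable (Spec_normalize_xkb_options options_set out) := by unfold Spec_normalize_xkb_options; infer_instance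

-- ===== CLAIM (what is proved, stated in full; the proofs are below) =====
def Claim_equal_normalize_xkb_options : Prop := ∀ (options_set : List String), Dom_normalize_xkb_options options_set → Spec_normalize_xkb_options options_set (normalize_xkb_options options_set)

-- ===== LEMMAS AND PROOFS =====

-- "option belongs to exclusive family f"
def pvMatch (f option : String) : Bool :=
  PySem.Str.isIn ":" option
  && pvExclusiveFamilies.contains (pvFamilyOf option)
  && (pvFamilyOf option == f)

-- the value pass 1 keeps for family f, abstract fold on Option String
def pvMinStep (f : String) (c : Option String) (option : String) : Option String :=
  if pvMatch f option then
    match c with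
    | none => some option
    | some b => if option < b then some option else some b
  else c

lemma pv_get_bestStep (xs : List String) (f : String) :
    ∀ d : PySem.Dict String String,
      (xs.foldl pvBestStep d).get? f = xs.foldl (pvMinStep f) (d.get? f) := by
  induction xs with
  | nil => intro d; rfl
  | cons a t ih =>
    intro d
    have hstep : (pvBestStep d a).get? f = pvMinStep f (d.get? f) a := by
      unfold pvBestStep pvMinStep pvMatch
      by_cases hc : PySem.Chars.isIn [':'] a.toList = true
      · by_cases he : pvFamilyOf a ∈ pvExclusiveFamilies
        · by_cases hf : pvFamilyOf a = f
          · subst hf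
            by_cases hin : d.contains (pvFamilyOf a) = false
            · have hnone : d.get? (pvFamilyOf a) = none := by
                rw [PySem.Dict.get?_eq_none_iff_contains]; exact hin
              simp [hc, he, hin, hnone, PySem.Dict.get?_insert_self]
            · have hsome : (d.get? (pvFamilyOf a)).isSome := by
                rw [← PySem.Dict.contains_eq_isSome_get?]
                simpa using hin
              obtain ⟨b, hb⟩ := Option.isSome_iff_exists.mp hsome
              have hgd : d.getD (pvFamilyOf a) "" = b :=
                PySem.Dict.getD_of_get?_eq_some _ _ hb
              by_cases hlt : a < b
              · simp [hc, he, hin, hb, hgd, hlt, PySem.Dict.get?_insert_self]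
              · simp [hc, he, hin, hb, hgd, hlt]
          · have hne : f ≠ pvFamilyOf a := fun h => hf h.symm
            have hg := PySem.Dict.get?_insert_of_ne (d := d)
              (k := pvFamilyOf a) (v := a) hne
            by_cases hin : d.contains (pvFamilyOf a) = false
            · simp [hc, he, hf, hin, hg]
            · by_cases hlt : a < d.getD (pvFamilyOf a) ""
              · simp [hc, he, hf, hin, hlt, hg]
              · simp [hc, he, hf, hin, hlt]
        · simp [hc, he]
      · simp [hc]
    rw [List.foldl_cons, List.foldl_cons, ih, hstep]

lemma pv_minStep_some (f a w : String) :
    ∃ u, pvMinStep f (some w) a = some u ∧ u ≤ w := by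
  by_cases hm : pvMatch f a = true
  · by_cases hlt : a < w
    · exact ⟨a, by simp [pvMinStep, hm, hlt], le_of_lt hlt⟩
    · exact ⟨w, by simp [pvMinStep, hm, hlt], le_refl w⟩
  · exact ⟨w, by simp [pvMinStep, hm], le_refl w⟩

lemma pv_minFold_some_le (f : String) :
    ∀ (t : List String) (w : String),
      ∃ v, t.foldl (pvMinStep f) (some w) = some v ∧ v ≤ w := by
  intro t
  induction t with
  | nil => intro w; exact ⟨w, rfl, le_refl w⟩
  | cons a t ih =>
    intro w
    obtain ⟨u, hu, huw⟩ := pv_minStep_some f a w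
    rw [List.foldl_cons, hu]
    obtain ⟨v, hv, hvu⟩ := ih u
    exact ⟨v, hv, le_trans hvu huw⟩

lemma pv_minFold_le (f : String) :
    ∀ (t : List String) (c : Option String) (o : String),
      o ∈ t → pvMatch f o = true →
      ∃ v, t.foldl (pvMinStep f) c = some v ∧ v ≤ o := by
  intro t
  induction t with
  | nil => intro c o ho; exact absurd ho (List.not_mem_nil)
  | cons a t ih =>
    intro c o ho hm
    rw [List.foldl_cons]
    rcases List.mem_cons.mp ho with rfl | hot
    · -- head: after the step the accumulator is some w with w ≤ o
      have hacc : ∃ w, pvMinStep f c o = some w ∧ w ≤ o := by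
        cases c with
        | none => exact ⟨o, by simp [pvMinStep, hm], le_refl o⟩
        | some b =>
          by_cases hlt : o < b
          · exact ⟨o, by simp [pvMinStep, hm, hlt], le_refl o⟩
          · exact ⟨b, by simp [pvMinStep, hm, hlt], le_of_not_gt hlt⟩
      obtain ⟨w, hw, hwo⟩ := hacc
      rw [hw]
      obtain ⟨v, hv, hvw⟩ := pv_minFold_some_le f t w
      exact ⟨v, hv, le_trans hvw hwo⟩
    · exact ih _ o hot hm

lemma pv_minFold_mem (f : String) :
    ∀ (t : List String) (c : Option String) (v : String),
      t.foldl (pvMinStep f) c = some v →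
      c = some v ∨ (v ∈ t ∧ pvMatch f v = true) := by
  intro t
  induction t with
  | nil => intro c v h; exact Or.inl h
  | cons a t ih =>
    intro c v h
    rw [List.foldl_cons] at h
    rcases ih _ v h with hstep | ⟨hvt, hvm⟩
    · by_cases hm : pvMatch f a = true
      · cases c with
        | none =>
          have hav : a = v := by simpa [pvMinStep, hm] using hstep
          exact Or.inr ⟨hav ▸ List.mem_cons_self, hav ▸ hm⟩
        | some b =>
          by_cases hlt : a < b
          · have hav : a = v := by simpa [pvMinStep, hm, hlt] using hstep
            exact Or.inr ⟨hav ▸ List.mem_cons_self, hav ▸ hm⟩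
          · exact Or.inl (by simpa [pvMinStep, hm, hlt] using hstep)
      · exact Or.inl (by simpa [pvMinStep, hm] using hstep)
    · exact Or.inr ⟨List.mem_cons.mpr (Or.inr hvt), hvm⟩

-- pvKeep in terms of pvMatch, for a matching option
lemma pv_keep_of_match {f o : String} (best : PySem.Dict String String)
    (hm : pvMatch f o = true) :
    pvKeep best o = (best.getD f "" == o) := by
  unfold pvMatch at hm
  simp only [Bool.and_eq_true, beq_iff_eq] at hm
  obtain ⟨⟨h1, h2⟩, h3⟩ := hm
  have h1' : PySem.Chars.isIn [':'] o.toList = true := by simpa using h1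
  have h2' : f ∈ pvExclusiveFamilies := h3 ▸ (by simpa using h2)
  unfold pvKeep
  simp [h1', h2', h3]

-- THE LOOP INVARIANT: A's fold from (seen, norm) equals norm updated with
-- B's filtered remainder, provided seen and best agree on the remainder t.
lemma pv_main (best : PySem.Dict String String) :
    ∀ (t : List String) (seen : PySem.Dict String String) (norm : PySem.Set String),
      t.Pairwise (· ≤ ·) →
      (∀ f, seen.contains f = true → ∀ o ∈ t, pvMatch f o = true →
          best.getD f "" ≠ o ∨ o ∈ norm) →
      (∀ f, seen.contains f = false →
          ((∃ o ∈ t, pvMatch f o = true) →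
              ∃ o ∈ t, pvMatch f o = true ∧ best.getD f "" = o) ∧
          (∀ o ∈ t, pvMatch f o = true → best.getD f "" ≤ o)) →
      (t.foldl pvAStep (seen, norm)).2 = PySem.Set.update norm (t.filter (pvKeep best)) := by
  intro t
  induction t with
  | nil => intro seen norm _ _ _; rfl
  | cons x t ih =>
    intro seen norm hpw h1 h2
    have hpwt : t.Pairwise (· ≤ ·) := (List.pairwise_cons.mp hpw).2
    have hxle : ∀ o ∈ t, x ≤ o := (List.pairwise_cons.mp hpw).1
    rw [List.foldl_cons]
    by_cases hc : PySem.Chars.isIn [':'] x.toList = true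
    · by_cases he : pvExclusiveFamilies.contains (pvFamilyOf x) = true
      · have he' : pvFamilyOf x ∈ pvExclusiveFamilies := by simpa using he
        have hmx : pvMatch (pvFamilyOf x) x = true := by
          unfold pvMatch; simp [hc, he']
        by_cases hseen : seen.contains (pvFamilyOf x) = false
        · -- first occurrence of this family: A records it; best is exactly x
          have hbx : best.getD (pvFamilyOf x) "" = x := by
            obtain ⟨hex, hle⟩ := h2 (pvFamilyOf x) hseen
            obtain ⟨o, ho, _, hbo⟩ := hex ⟨x, List.mem_cons_self, hmx⟩
            have h1' : best.getD (pvFamilyOf x) "" ≤ x := hle x List.mem_cons_self hmx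
            rcases List.mem_cons.mp ho with rfl | hot
            · exact hbo
            · exact le_antisymm h1' (hbo ▸ hxle o hot)
          have hkx : pvKeep best x = true := by
            rw [pv_keep_of_match best hmx, hbx]; simp
          have hstep : pvAStep (seen, norm) x =
              (seen.insert (pvFamilyOf x) x, norm.add x) := by
            unfold pvAStep; simp [hc, he', hseen]
          rw [hstep, List.filter_cons_of_pos hkx, PySem.Set.update_cons]
          apply ih _ _ hpwt
          · intro f hf o hot hmo
            rcases PySem.Dict.contains_insert (d := seen) (k := pvFamilyOf x)
                (k' := f) (v := x) ▸ hf with h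
            by_cases hff : f = pvFamilyOf x
            · subst hff
              rcases eq_or_lt_of_le (hxle o hot) with rfl | hlt
              · exact Or.inr (by simp [PySem.Set.mem_add])
              · exact Or.inl (by rw [hbx]; exact ne_of_lt hlt)
            · have hfs : seen.contains f = true := by
                have := PySem.Dict.contains_insert (d := seen) (k := pvFamilyOf x)
                  (k' := f) (v := x)
                rw [this] at hf
                simpa [hff] using hf
              rcases h1 f hfs o (List.mem_cons.mpr (Or.inr hot)) hmo with hne | hmem
              · exact Or.inl hne
              · exact Or.inr (by rw [PySem.Set.mem_add]; exact Or.inl hmem)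
          · intro f hf
            have hff : f ≠ pvFamilyOf x := by
              intro h; subst h
              rw [PySem.Dict.contains_insert] at hf
              simp at hf
            have hfs : seen.contains f = false := by
              rw [PySem.Dict.contains_insert] at hf
              simpa [hff] using hf
            obtain ⟨hex, hle⟩ := h2 f hfs
            constructor
            · intro ⟨o, ho, hmo⟩
              obtain ⟨o', ho', hmo', hbo'⟩ :=
                hex ⟨o, List.mem_cons.mpr (Or.inr ho), hmo⟩
              rcases List.mem_cons.mp ho' with rfl | hot'
              · exfalso
                unfold pvMatch at hmo'
                simp only [Bool.and_eq_true, beq_iff_eq] at hmo'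
                exact hff hmo'.2.symm
              · exact ⟨o', hot', hmo', hbo'⟩
            · intro o hot hmo
              exact hle o (List.mem_cons.mpr (Or.inr hot)) hmo
        · -- family already handled: A skips x, and the filter drops or dedups x
          have hseen' : seen.contains (pvFamilyOf x) = true := by
            simpa using hseen
          have hstep : pvAStep (seen, norm) x = (seen, norm) := by
            unfold pvAStep; simp [hc, he', hseen']
          rw [hstep]
          have htail :
              (t.foldl pvAStep (seen, norm)).2 =
                PySem.Set.update norm (t.filter (pvKeep best)) := by
            apply ih _ _ hpwt
            · intro f hf o hot hmo
              exact h1 f hf o (List.mem_cons.mpr (Or.inr hot)) hmo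
            · intro f hf
              obtain ⟨hex, hle⟩ := h2 f hf
              constructor
              · intro ⟨o, ho, hmo⟩
                obtain ⟨o', ho', hmo', hbo'⟩ :=
                  hex ⟨o, List.mem_cons.mpr (Or.inr ho), hmo⟩
                rcases List.mem_cons.mp ho' with rfl | hot'
                · -- o' = x would mean f = family of x, whose seen flag is true
                  exfalso
                  unfold pvMatch at hmo'
                  simp only [Bool.and_eq_true, beq_iff_eq] at hmo'
                  rw [← hmo'.2] at hf
                  rw [hseen'] at hf
                  simp at hf
                · exact ⟨o', hot', hmo', hbo'⟩
              · intro o hot hmo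
                exact hle o (List.mem_cons.mpr (Or.inr hot)) hmo
          rcases h1 (pvFamilyOf x) hseen' x List.mem_cons_self hmx with hne | hmem
          · have hkx : pvKeep best x = false := by
              rw [pv_keep_of_match best hmx]
              simpa using hne
            rw [List.filter_cons_of_neg (by simp [hkx]), htail]
          · by_cases hkx : pvKeep best x = true
            · rw [List.filter_cons_of_pos hkx, PySem.Set.update_cons,
                PySem.Set.add_of_mem hmem, htail]
            · rw [List.filter_cons_of_neg (by simpa using hkx), htail]
      · -- non-exclusive family: both keep x
        have he' : pvFamilyOf x ∉ pvExclusiveFamilies := by simpa using he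
        have hkx : pvKeep best x = true := by unfold pvKeep; simp [he']
        have hstep : pvAStep (seen, norm) x = (seen, norm.add x) := by
          unfold pvAStep; simp [hc, he']
        rw [hstep, List.filter_cons_of_pos hkx, PySem.Set.update_cons]
        apply ih _ _ hpwt
        · intro f hf o hot hmo
          rcases h1 f hf o (List.mem_cons.mpr (Or.inr hot)) hmo with hne | hmem
          · exact Or.inl hne
          · exact Or.inr (by rw [PySem.Set.mem_add]; exact Or.inl hmem)
        · intro f hf
          obtain ⟨hex, hle⟩ := h2 f hf
          constructor
          · intro ⟨o, ho, hmo⟩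
            obtain ⟨o', ho', hmo', hbo'⟩ :=
              hex ⟨o, List.mem_cons.mpr (Or.inr ho), hmo⟩
            rcases List.mem_cons.mp ho' with rfl | hot'
            · exfalso
              unfold pvMatch at hmo'
              simp only [Bool.and_eq_true] at hmo'
              exact he' (by simpa using hmo'.1.2)
            · exact ⟨o', hot', hmo', hbo'⟩
          · intro o hot hmo
            exact hle o (List.mem_cons.mpr (Or.inr hot)) hmo
    · -- no colon: both keep x
      have hkx : pvKeep best x = true := by unfold pvKeep; simp [hc]
      have hstep : pvAStep (seen, norm) x = (seen, norm.add x) := by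
        unfold pvAStep; simp [hc]
      rw [hstep, List.filter_cons_of_pos hkx, PySem.Set.update_cons]
      apply ih _ _ hpwt
      · intro f hf o hot hmo
        rcases h1 f hf o (List.mem_cons.mpr (Or.inr hot)) hmo with hne | hmem
        · exact Or.inl hne
        · exact Or.inr (by rw [PySem.Set.mem_add]; exact Or.inl hmem)
      · intro f hf
        obtain ⟨hex, hle⟩ := h2 f hf
        constructor
        · intro ⟨o, ho, hmo⟩
          obtain ⟨o', ho', hmo', hbo'⟩ :=
            hex ⟨o, List.mem_cons.mpr (Or.inr ho), hmo⟩
          rcases List.mem_cons.mp ho' with rfl | hot'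
          · exfalso
            unfold pvMatch at hmo'
            simp only [Bool.and_eq_true] at hmo'
            exact hc (by simpa using hmo'.1.1)
          · exact ⟨o', hot', hmo', hbo'⟩
        · intro o hot hmo
          exact hle o (List.mem_cons.mpr (Or.inr hot)) hmo

-- ===== VERDICT (by name: the statement is the Claim_ definition above) =====
theorem normalize_xkb_options_spec : Claim_equal_normalize_xkb_options := by
  intro options_set _
  unfold Spec_normalize_xkb_options normalize_xkb_options normalize_xkb_options_alt
  by_cases hemp : options_set.isEmpty
  · simp [hemp]
  · simp only [hemp, if_false]
    set s := PySem.List.sorted options_set (fun x => x) false with hs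
    set best := options_set.foldl pvBestStep PySem.Dict.empty with hbest
    have hperm : s.Perm options_set := PySem.List.sorted_perm options_set _ _
    have hpw : s.Pairwise (· ≤ ·) := PySem.List.sorted_pairwise options_set _
    have hmain := pv_main best s PySem.Dict.empty PySem.Set.empty hpw
      (by intro f hf; rw [PySem.Dict.contains_empty] at hf; exact absurd hf (by simp))
      (by
        intro f _
        have hfold : best.get? f =
            options_set.foldl (pvMinStep f) none := by
          rw [hbest, pv_get_bestStep, PySem.Dict.get?_empty]
        constructor
        · intro ⟨o, ho, hmo⟩
          have ho' : o ∈ options_set := hperm.mem_iff.mp ho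
          obtain ⟨v, hv, _⟩ := pv_minFold_le f options_set none o ho' hmo
          rcases pv_minFold_mem f options_set none v hv with h | ⟨hvmem, hvm⟩
          · exact absurd h (by simp)
          · refine ⟨v, hperm.mem_iff.mpr hvmem, hvm, ?_⟩
            exact PySem.Dict.getD_of_get?_eq_some _ _ (hfold.trans hv)
        · intro o ho hmo
          have ho' : o ∈ options_set := hperm.mem_iff.mp ho
          obtain ⟨v, hv, hvle⟩ := pv_minFold_le f options_set none o ho' hmo
          have : best.getD f "" = v :=
            PySem.Dict.getD_of_get?_eq_some _ _ (hfold.trans hv)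
          rw [this]; exact hvle)
    rw [hmain, PySem.Set.update_empty]
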